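-- pv_equiv track=rewrite | github.com/mithamk/TrueReview | src/analysis_engine/bug_severity.py | classify_bug
-- ===== SOURCE A (Python) =====
-- def classify_bug(text):
--     t = text.lower()
--
--     if any(k in t for k in ["security", "vulnerability", "exploit"]):
--         return "critical"
--     elif any(k in t for k in ["fix", "bug", "error", "issue", "fail"]):
--         return "high"
--     elif any(k in t for k in ["patch", "update", "improve"]):
--         return "medium"
--     else:
--         return "low"
-- ===== SOURCE B (Python) =====
-- KEYWORD_RANK = {
--     "security": 3, "vulnerability": 3, "exploit": 3,
--     "fix": 2, "bug": 2, "error": 2, "issue": 2, "fail": 2,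
--     "patch": 1, "update": 1, "improve": 1,
-- }
-- NAMES = ["low", "medium", "high", "critical"]
--
-- def classify_bug(text):
--     t = text.lower()
--     best = max((r for k, r in KEYWORD_RANK.items() if k in t), default=0)
--     return NAMES[best]
-- ===== Notes on version B (the rewrite author's own statement) =====
-- stated objective: alternative
-- what changed: Instead of an ordered early-exit cascade of per-tier any() tests, B maps every keyword to a numeric rank, takes the maximum rank over all matching keywords in one pass, and indexes a name table with it; priority emerges from max rather than from evaluation order.
import Mathlib
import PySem

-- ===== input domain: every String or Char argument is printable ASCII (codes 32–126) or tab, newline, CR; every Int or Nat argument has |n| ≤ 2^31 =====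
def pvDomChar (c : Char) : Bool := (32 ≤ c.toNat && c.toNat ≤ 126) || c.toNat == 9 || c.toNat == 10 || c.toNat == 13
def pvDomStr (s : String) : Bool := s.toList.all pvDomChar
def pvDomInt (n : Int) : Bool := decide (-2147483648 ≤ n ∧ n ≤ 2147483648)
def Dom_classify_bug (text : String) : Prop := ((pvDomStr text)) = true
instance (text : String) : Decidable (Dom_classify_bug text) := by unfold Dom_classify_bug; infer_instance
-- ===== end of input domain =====

-- B replaces the ordered early-exit cascade with a keyword→rank map, a one-pass max over matching
-- keywords, and a name table lookup (alternative decomposition; same cost).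
-- ===== PORT A =====
def classify_bug (text : String) : String :=
  let t := PySem.Str.lower text
  if PySem.Str.isIn "security" t || PySem.Str.isIn "vulnerability" t || PySem.Str.isIn "exploit" t then
    "critical"
  else if PySem.Str.isIn "fix" t || PySem.Str.isIn "bug" t || PySem.Str.isIn "error" t || PySem.Str.isIn "issue" t || PySem.Str.isIn "fail" t then
    "high"
  else if PySem.Str.isIn "patch" t || PySem.Str.isIn "update" t || PySem.Str.isIn "improve" t then
    "medium"
  else
    "low"

-- ===== PORT B =====
def pvKeywordRank : List (String × Int) :=
  [("security", 3), ("vulnerability", 3), ("exploit", 3),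
   ("fix", 2), ("bug", 2), ("error", 2), ("issue", 2), ("fail", 2),
   ("patch", 1), ("update", 1), ("improve", 1)]

def pvNames : List String := ["low", "medium", "high", "critical"]

def classify_bug_alt (text : String) : String :=
  let t := PySem.Str.lower text
  -- max(... , default=0) over the ranks of matching keywords, then NAMES[best]
  let best : Int :=
    ((pvKeywordRank.filter (fun p => PySem.Str.isIn p.1 t)).map Prod.snd).foldl max 0
  (PySem.List.pyGet? pvNames best).getD ""

-- ===== PRECONDITION & SPEC =====
def Spec_classify_bug (text : String) (out : String) : Prop := out = classify_bug_alt text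
instance (text : String) (out : String) : Decidable (Spec_classify_bug text out) := by unfold Spec_classify_bug; infer_instance

-- ===== CLAIM (what is proved, stated in full; the proofs are below) =====
def Claim_equal_classify_bug : Prop := ∀ (text : String), Dom_classify_bug text → Spec_classify_bug text (classify_bug text)

-- ===== LEMMAS AND PROOFS =====
theorem classify_bug_gen (t : String) :
    (let best : Int :=
      ((pvKeywordRank.filter (fun p => PySem.Str.isIn p.1 t)).map Prod.snd).foldl max 0
     (PySem.List.pyGet? pvNames best).getD "") =
    (if PySem.Str.isIn "security" t || PySem.Str.isIn "vulnerability" t || PySem.Str.isIn "exploit" t then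
      "critical"
    else if PySem.Str.isIn "fix" t || PySem.Str.isIn "bug" t || PySem.Str.isIn "error" t || PySem.Str.isIn "issue" t || PySem.Str.isIn "fail" t then
      "high"
    else if PySem.Str.isIn "patch" t || PySem.Str.isIn "update" t || PySem.Str.isIn "improve" t then
      "medium"
    else
      "low") := by
  simp only [pvKeywordRank, List.filter]
  generalize PySem.Str.isIn "security" t = b1
  generalize PySem.Str.isIn "vulnerability" t = b2
  generalize PySem.Str.isIn "exploit" t = b3
  generalize PySem.Str.isIn "fix" t = b4
  generalize PySem.Str.isIn "bug" t = b5
  generalize PySem.Str.isIn "error" t = b6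
  generalize PySem.Str.isIn "issue" t = b7
  generalize PySem.Str.isIn "fail" t = b8
  generalize PySem.Str.isIn "patch" t = b9
  generalize PySem.Str.isIn "update" t = b10
  generalize PySem.Str.isIn "improve" t = b11
  revert b1 b2 b3 b4 b5 b6 b7 b8 b9 b10 b11
  decide

-- ===== VERDICT (by name: the statement is the Claim_ definition above) =====
theorem classify_bug_spec : Claim_equal_classify_bug := by
  intro text _
  unfold Spec_classify_bug classify_bug classify_bug_alt
  exact (classify_bug_gen (PySem.Str.lower text)).symm
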